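-- pv_equiv track=rewrite | github.com/paiml/depyler | examples/hard_runge_kutta.py | rk4_constant
-- ===== SOURCE A (Python) =====
-- def rk4_constant(y0: int, rate: int, x0: int, x_end: int, steps: int, scale: int) -> int:
--     # Solve dy/dx = rate (constant rate)
--     if steps == 0:
--         return y0
--     h: int = (x_end - x0) // steps
--     y: int = y0
--     i: int = 0
--     while i < steps:
--         k1: int = rate
--         k2: int = rate
--         k3: int = rate
--         k4: int = rate
--         y = y + h * (k1 + 2 * k2 + 2 * k3 + k4) // (6 * scale)
--         i = i + 1
--     return y
-- ===== SOURCE B (Python) =====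
-- def rk4_constant(y0: int, rate: int, x0: int, x_end: int, steps: int, scale: int) -> int:
--     # Each RK4 step of a constant-rate ODE adds the same increment, so sum it in closed form.
--     if steps <= 0:
--         return y0
--     h = (x_end - x0) // steps
--     return y0 + steps * ((h * (6 * rate)) // (6 * scale))
-- ===== Notes on version B (the rewrite author's own statement) =====
-- stated objective: faster
-- what changed: replaced the step-by-step RK4 loop (which adds the same constant increment every iteration) by the closed form y0 + steps * (h*(6*rate) // (6*scale))
import Mathlib
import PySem

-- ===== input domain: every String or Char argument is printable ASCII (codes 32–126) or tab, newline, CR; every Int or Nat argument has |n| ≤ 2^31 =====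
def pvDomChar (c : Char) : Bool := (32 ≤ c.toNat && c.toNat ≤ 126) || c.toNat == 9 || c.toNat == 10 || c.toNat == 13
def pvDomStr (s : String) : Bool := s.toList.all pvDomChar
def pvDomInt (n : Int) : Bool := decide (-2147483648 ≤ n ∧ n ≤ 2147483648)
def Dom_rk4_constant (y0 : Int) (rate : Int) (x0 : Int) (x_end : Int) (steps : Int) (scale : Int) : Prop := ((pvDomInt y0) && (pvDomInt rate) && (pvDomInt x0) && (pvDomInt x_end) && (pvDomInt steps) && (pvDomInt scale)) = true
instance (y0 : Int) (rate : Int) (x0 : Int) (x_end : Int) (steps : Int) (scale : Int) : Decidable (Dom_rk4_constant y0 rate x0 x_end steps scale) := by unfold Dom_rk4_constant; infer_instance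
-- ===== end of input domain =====

-- B replaces A's per-step loop (constant increment each iteration) by a closed form; faster (O(1) vs O(steps)).
-- ===== PORT A =====
def rk4A_loop (y h rate scale : Int) : Nat → Int
  | 0 => y
  | n + 1 =>
      rk4A_loop (y + PySem.Int.floordiv (h * (rate + 2 * rate + 2 * rate + rate)) (6 * scale)) h rate scale n

def rk4_constant (y0 : Int) (rate : Int) (x0 : Int) (x_end : Int) (steps : Int) (scale : Int) : Int :=
  if steps = 0 then y0
  else
    let h := PySem.Int.floordiv (x_end - x0) steps
    rk4A_loop y0 h rate scale steps.toNat

-- ===== PORT B =====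
def rk4_constant_alt (y0 : Int) (rate : Int) (x0 : Int) (x_end : Int) (steps : Int) (scale : Int) : Int :=
  if steps ≤ 0 then y0
  else
    let h := PySem.Int.floordiv (x_end - x0) steps
    y0 + steps * PySem.Int.floordiv (h * (6 * rate)) (6 * scale)

-- ===== PRECONDITION & SPEC =====
-- Pre_ excludes exactly the inputs where A raises ZeroDivisionError: steps > 0 with scale = 0.
def Pre_rk4_constant (y0 : Int) (rate : Int) (x0 : Int) (x_end : Int) (steps : Int) (scale : Int) : Prop :=
  0 < steps → scale ≠ 0
instance (y0 : Int) (rate : Int) (x0 : Int) (x_end : Int) (steps : Int) (scale : Int) : Decidable (Pre_rk4_constant y0 rate x0 x_end steps scale) := by unfold Pre_rk4_constant; infer_instance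
def pvWitness_rk4_constant : Int × Int × Int × Int × Int × Int := (7, 3, 0, 10, 4, 2)
def Spec_rk4_constant (y0 : Int) (rate : Int) (x0 : Int) (x_end : Int) (steps : Int) (scale : Int) (out : Int) : Prop := out = rk4_constant_alt y0 rate x0 x_end steps scale
instance (y0 : Int) (rate : Int) (x0 : Int) (x_end : Int) (steps : Int) (scale : Int) (out : Int) : Decidable (Spec_rk4_constant y0 rate x0 x_end steps scale out) := by unfold Spec_rk4_constant; infer_instance

-- ===== CLAIM (what is proved, stated in full; the proofs are below) =====
def Claim_equal_rk4_constant : Prop := ∀ (y0 : Int) (rate : Int) (x0 : Int) (x_end : Int) (steps : Int) (scale : Int), Dom_rk4_constant y0 rate x0 x_end steps scale → Pre_rk4_constant y0 rate x0 x_end steps scale → Spec_rk4_constant y0 rate x0 x_end steps scale (rk4_constant y0 rate x0 x_end steps scale)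

-- ===== LEMMAS AND PROOFS =====
theorem rk4A_loop_eq (h rate scale : Int) (n : Nat) : ∀ y : Int,
    rk4A_loop y h rate scale n = y + n * PySem.Int.floordiv (h * (rate + 2 * rate + 2 * rate + rate)) (6 * scale) := by
  induction n with
  | zero => intro y; simp [rk4A_loop]
  | succ k ih =>
      intro y
      rw [rk4A_loop, ih]
      push_cast
      ring

-- ===== VERDICT (by name: the statement is the Claim_ definition above) =====
theorem rk4_constant_spec : Claim_equal_rk4_constant := by
  intro y0 rate x0 x_end steps scale _ _
  unfold Spec_rk4_constant rk4_constant rk4_constant_alt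
  rcases lt_trichotomy steps 0 with hlt | heq | hgt
  · rw [if_neg (by omega), if_pos (by omega)]
    have : steps.toNat = 0 := by omega
    simp [this, rk4A_loop]
  · simp [heq]
  · rw [if_neg (by omega), if_neg (by omega), rk4A_loop_eq]
    have h6 : rate + 2 * rate + 2 * rate + rate = 6 * rate := by ring
    have ht : (steps.toNat : Int) = steps := by omega
    rw [h6, ht]
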